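-- pv_equiv track=rewrite | github.com/lms2004/open_researcher_train | examples/openresearcher/materialize.py | _tool_validation
-- ===== SOURCE A (Python) =====
-- from typing import Any, Dict, List, Optional, Tuple
--
-- def _tool_validation(messages: List[Dict[str, Any]]) -> Optional[str]:
--     any_tool_call = any(
--         ("<tool_call>" in (m.get("content") or "")) or ("<tool_call>" in (m.get("reasoning_content") or ""))
--         for m in messages
--         if isinstance(m, dict)
--     )
--     if not any_tool_call:
--         return None
--     any_tools_header = any(
--         ("# Tools" in (m.get("content") or "")) or ("# Tools" in (m.get("reasoning_content") or ""))
--         for m in messages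
--         if isinstance(m, dict)
--     )
--     if not any_tools_header:
--         return "tool_call present but # Tools missing"
--     return None
-- ===== SOURCE B (Python) =====
-- from typing import Any, Dict, List, Optional
--
-- def _tool_validation(messages: List[Dict[str, Any]]) -> Optional[str]:
--     has_tool_call = False
--     has_header = False
--     for m in messages:
--         if not isinstance(m, dict):
--             continue
--         content = m.get("content") or ""
--         reasoning = m.get("reasoning_content") or ""
--         if "<tool_call>" in content or "<tool_call>" in reasoning:
--             has_tool_call = True
--         if "# Tools" in content or "# Tools" in reasoning:
--             has_header = True
--         if has_tool_call and has_header: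
--             break
--     if not has_tool_call:
--         return None
--     if not has_header:
--         return "tool_call present but # Tools missing"
--     return None
-- ===== Notes on version B (the rewrite author's own statement) =====
-- stated objective: alternative
-- what changed: Replaced the two separate any() comprehension scans over messages with one explicit loop that reads each message's content/reasoning_content once, maintains both flags, and breaks early once both are set.
import Mathlib
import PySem

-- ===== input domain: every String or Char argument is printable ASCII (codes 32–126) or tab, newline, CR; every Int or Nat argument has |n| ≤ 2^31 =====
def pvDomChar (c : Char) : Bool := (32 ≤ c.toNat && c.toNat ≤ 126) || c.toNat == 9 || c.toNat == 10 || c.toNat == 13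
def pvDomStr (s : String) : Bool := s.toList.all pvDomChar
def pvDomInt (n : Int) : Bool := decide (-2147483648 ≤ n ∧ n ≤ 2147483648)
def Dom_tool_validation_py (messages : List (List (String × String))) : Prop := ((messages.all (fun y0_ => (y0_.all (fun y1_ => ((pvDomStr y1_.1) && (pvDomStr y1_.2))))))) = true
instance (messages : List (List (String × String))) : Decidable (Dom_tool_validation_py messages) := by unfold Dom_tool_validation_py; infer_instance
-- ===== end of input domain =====

-- B fuses A's two any() scans into one explicit loop over messages keeping two flags with early break; objective: alternative single-pass decomposition.


-- ===== PORT A =====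
-- 'sub in (m.get(k) or "")' for one message m and key k
def pvHasSub (sub : String) (m : List (String × String)) (k : String) : Bool :=
  PySem.Str.isIn sub ((PySem.Dict.mk m).getD k "")

def tool_validation_py (messages : List (List (String × String))) : Option String :=
  let any_tool_call :=
    messages.any (fun m => pvHasSub "<tool_call>" m "content" || pvHasSub "<tool_call>" m "reasoning_content")
  if !any_tool_call then none
  else
    let any_tools_header :=
      messages.any (fun m => pvHasSub "# Tools" m "content" || pvHasSub "# Tools" m "reasoning_content")
    if !any_tools_header then some "tool_call present but # Tools missing"
    else none

-- ===== PORT B =====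
-- single pass: carry (has_tool_call, has_header), break once both are set
def pvScan : List (List (String × String)) → Bool → Bool → Bool × Bool
  | [], tc, hd => (tc, hd)
  | m :: rest, tc, hd =>
    let content := (PySem.Dict.mk m).getD "content" ""
    let reasoning := (PySem.Dict.mk m).getD "reasoning_content" ""
    let tc' := tc || PySem.Str.isIn "<tool_call>" content || PySem.Str.isIn "<tool_call>" reasoning
    let hd' := hd || PySem.Str.isIn "# Tools" content || PySem.Str.isIn "# Tools" reasoning
    if tc' && hd' then (tc', hd') else pvScan rest tc' hd'

def tool_validation_py_alt (messages : List (List (String × String))) : Option String :=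
  let flags := pvScan messages false false
  if !flags.1 then none
  else if !flags.2 then some "tool_call present but # Tools missing"
  else none

-- ===== PRECONDITION & SPEC =====
def Spec_tool_validation_py (messages : List (List (String × String))) (out : Option String) : Prop := out = tool_validation_py_alt messages
instance (messages : List (List (String × String))) (out : Option String) : Decidable (Spec_tool_validation_py messages out) := by unfold Spec_tool_validation_py; infer_instance

-- ===== CLAIM (what is proved, stated in full; the proofs are below) =====
def Claim_equal_tool_validation_py : Prop := ∀ (messages : List (List (String × String))), Dom_tool_validation_py messages → Spec_tool_validation_py messages (tool_validation_py messages)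

-- ===== LEMMAS AND PROOFS =====
theorem pvScan_eq (messages : List (List (String × String))) (tc hd : Bool) :
    pvScan messages tc hd =
      (tc || messages.any (fun m => pvHasSub "<tool_call>" m "content" || pvHasSub "<tool_call>" m "reasoning_content"),
       hd || messages.any (fun m => pvHasSub "# Tools" m "content" || pvHasSub "# Tools" m "reasoning_content")) := by
  induction messages generalizing tc hd with
  | nil => simp [pvScan]
  | cons m rest ih =>
    simp only [pvScan, List.any_cons, pvHasSub]
    split
    · rename_i h
      simp only [Bool.and_eq_true] at h
      obtain ⟨h1, h2⟩ := h
      simp [← Bool.or_assoc] at *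
      constructor
      · cases tc <;> simp_all
      · cases hd <;> simp_all
    · rw [ih]
      simp [pvHasSub, Bool.or_assoc]

-- ===== VERDICT (by name: the statement is the Claim_ definition above) =====
theorem tool_validation_py_spec : Claim_equal_tool_validation_py := by
  intro messages _
  unfold Spec_tool_validation_py tool_validation_py tool_validation_py_alt
  rw [pvScan_eq]
  simp
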